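-- pv_equiv track=rewrite | github.com/nabroleonx/A2SV | 1170-compare-strings-by-frequency-of-the-smallest-character/1170-compare-strings-by-frequency-of-the-smallest-character.py | numSmallerByFrequency
-- ===== SOURCE A (Python) =====
-- from typing import List
--
-- def numSmallerByFrequency(queries: List[str], words: List[str]) -> List[int]:
--     n = len(words)
--     def f(s):
--         x = min(set(s))
--         return s.count(x)
--
--     def less_frequent_BS(q):
--         l = 0
--         r = n-1
--         pos = -1
--         while l<=r:
--             mid = (l+r)//2
--             if words[mid] <= q:
--                 l = mid + 1
--             elif words[mid] > q:
--                 pos = mid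
--                 r = mid - 1
--
--         return n-pos if pos != -1 else 0
--
--     queries = [f(q) for q in queries]
--     words = [f(w) for w in words]
--
--     words.sort()
--
--     res = []
--     for q in queries:
--         lf = less_frequent_BS(q)
--         res.append(lf)
--
--     return res
-- ===== SOURCE B (Python) =====
-- def numSmallerByFrequency(queries, words):
--     def f(s):
--         m = min(s)
--         return s.count(m)
--     word_freqs = [f(w) for w in words]
--     return [sum(1 for v in word_freqs if v > fq) for fq in map(f, queries)]
-- ===== Notes on version B (the rewrite author's own statement) =====
-- stated objective: simpler
-- what changed: Replaced the sort plus per-query hand-written binary search by a direct count of word frequencies strictly greater than each query frequency (no sorting, no index arithmetic).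
import Mathlib
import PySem

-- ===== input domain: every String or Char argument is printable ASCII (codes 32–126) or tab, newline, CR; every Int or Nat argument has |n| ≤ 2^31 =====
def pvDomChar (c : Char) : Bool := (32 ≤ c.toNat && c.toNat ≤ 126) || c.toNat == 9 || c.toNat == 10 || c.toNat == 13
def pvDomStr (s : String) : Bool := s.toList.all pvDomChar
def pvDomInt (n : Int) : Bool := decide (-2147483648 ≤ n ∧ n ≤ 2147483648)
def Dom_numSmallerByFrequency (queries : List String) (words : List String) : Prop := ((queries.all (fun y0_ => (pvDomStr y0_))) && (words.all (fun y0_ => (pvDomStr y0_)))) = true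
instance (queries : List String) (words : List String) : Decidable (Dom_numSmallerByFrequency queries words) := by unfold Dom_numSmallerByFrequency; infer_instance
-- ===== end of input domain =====

-- B replaces A's sort + per-query hand-written binary search by a direct count of
-- word frequencies strictly greater than each query frequency (simpler; not faster).


-- ===== PORT A =====
-- f(s): x = min(set(s)); return s.count(x).  Python raises ValueError on the empty
-- string; Pre_ excludes it, the Lean default there is 0.
def pvFA (s : String) : Int :=
  match PySem.List.min? (PySem.Set.ofList s.toList) (fun c => c) with
  | some x => (s.toList.count x : Int)
  | none => 0

-- the while-loop of less_frequent_BS, state (l, r, pos); fuel = (r - l + 1).toNat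
-- bounds the iteration count (the measure r - l strictly decreases), a totality
-- guard only.  words[mid] is in range whenever the loop runs (0 ≤ l ≤ mid ≤ r < n),
-- so pyGetD's default is never read.
def pvBSGo (ws : List Int) (n q : Int) (fuel : Nat) (l r pos : Int) : Int :=
  match fuel with
  | 0 => if pos ≠ -1 then n - pos else 0
  | fuel' + 1 =>
    if l ≤ r then
      let mid := PySem.Int.floordiv (l + r) 2
      if PySem.List.pyGetD ws mid 0 ≤ q then
        pvBSGo ws n q fuel' (mid + 1) r pos
      else
        pvBSGo ws n q fuel' l (mid - 1) mid
    else
      if pos ≠ -1 then n - pos else 0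

def pvBS (ws : List Int) (n q l r pos : Int) : Int :=
  pvBSGo ws n q (r - l + 1).toNat l r pos

def numSmallerByFrequency (queries : List String) (words : List String) : List Int :=
  let n : Int := (words.length : Int)
  let qf := queries.map pvFA
  let wf := words.map pvFA
  let ws := PySem.List.sorted wf (fun x => x) false
  -- res = []; for q in queries: res.append(less_frequent_BS(q))
  qf.foldl (fun res q => res ++ [pvBS ws n q 0 (n - 1) (-1)]) []

-- ===== PORT B =====
-- f(s): m = min(s); return s.count(m)  (0 on the empty string, outside Pre_)
def pvFB (s : String) : Int :=
  match PySem.List.min? s.toList (fun c => c) with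
  | some m => (s.toList.count m : Int)
  | none => 0

def numSmallerByFrequency_alt (queries : List String) (words : List String) : List Int :=
  let wordFreqs := words.map pvFB
  queries.map (fun q =>
    let fq := pvFB q
    ((wordFreqs.countP (fun v => fq < v) : Nat) : Int))

-- ===== PRECONDITION & SPEC =====
-- Pre_ excludes inputs containing an empty string: there min(set(s)) raises
-- ValueError in Python A (and min(s) raises it in B).
def Pre_numSmallerByFrequency (queries : List String) (words : List String) : Prop :=
  (∀ s ∈ queries, s.toList ≠ []) ∧ (∀ s ∈ words, s.toList ≠ [])
instance (queries : List String) (words : List String) : Decidable (Pre_numSmallerByFrequency queries words) := by unfold Pre_numSmallerByFrequency; infer_instance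
def pvWitness_numSmallerByFrequency : List String × List String := (["b"], ["a"])

def Spec_numSmallerByFrequency (queries : List String) (words : List String) (out : List Int) : Prop := out = numSmallerByFrequency_alt queries words
instance (queries : List String) (words : List String) (out : List Int) : Decidable (Spec_numSmallerByFrequency queries words out) := by unfold Spec_numSmallerByFrequency; infer_instance

-- ===== CLAIM (what is proved, stated in full; the proofs are below) =====
def Claim_equal_numSmallerByFrequency : Prop := ∀ (queries : List String) (words : List String), Dom_numSmallerByFrequency queries words → Pre_numSmallerByFrequency queries words → Spec_numSmallerByFrequency queries words (numSmallerByFrequency queries words)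

-- ===== LEMMAS AND PROOFS =====

-- the two frequency functions agree (even on the empty string, where both default to 0)
theorem pvFA_eq_pvFB (s : String) : pvFA s = pvFB s := by
  unfold pvFA pvFB
  rcases hs : PySem.List.min? s.toList (fun c : Char => c) with _ | m
  · have : s.toList = [] := (PySem.List.min?_eq_none_iff _ _).1 hs
    rw [this]
    rfl
  · rcases ho : PySem.List.min? (PySem.Set.ofList s.toList) (fun c : Char => c) with _ | x
    · have : PySem.Set.ofList s.toList = [] := (PySem.List.min?_eq_none_iff _ _).1 ho
      have hm : m ∈ s.toList := PySem.List.min?_mem hs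
      have : m ∈ PySem.Set.ofList s.toList := (PySem.Set.mem_ofList _ _).2 hm
      simp_all
    · -- both are the (unique) minimum value of s.toList
      have hmmem : m ∈ s.toList := PySem.List.min?_mem hs
      have hxmem : x ∈ s.toList := (PySem.Set.mem_ofList _ _).1 (PySem.List.min?_mem ho)
      have h1 : m ≤ x := PySem.List.min?_isMin hs x hxmem
      have h2 : x ≤ m := PySem.List.min?_isMin ho m ((PySem.Set.mem_ofList _ _).2 hmmem)
      have : x = m := le_antisymm h2 h1
      rw [this]

-- in a ≤-sorted list the elements ≤ q form a prefix of length countP (· ≤ q)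
theorem sorted_prefix_le (q : Int) :
    ∀ (ws : List Int), ws.Pairwise (· ≤ ·) → ∀ i : Nat, (hi : i < ws.length) →
      (ws[i] ≤ q ↔ i < ws.countP (fun v => decide (v ≤ q))) := by
  intro ws
  induction ws with
  | nil => intro _ i hi; simp at hi
  | cons x t ih =>
    intro hp i hi
    have hx := (List.pairwise_cons.1 hp).1
    have ht := (List.pairwise_cons.1 hp).2
    have htail0 : ¬ x ≤ q → t.countP (fun v => decide (v ≤ q)) = 0 := by
      intro hxq
      rw [List.countP_eq_zero]
      intro y hy
      simp only [decide_eq_true_eq]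
      intro hyq
      exact hxq (le_trans (hx y hy) hyq)
    cases i with
    | zero =>
      simp only [List.getElem_cons_zero, List.countP_cons]
      by_cases hxq : x ≤ q
      · simp [hxq]
      · have := htail0 hxq
        simp [hxq, this]
    | succ j =>
      have hj : j < t.length := by simpa using hi
      have := ih ht j hj
      simp only [List.getElem_cons_succ, List.countP_cons]
      by_cases hxq : x ≤ q
      · simp only [hxq, decide_true, if_true]
        omega
      · have h0 := htail0 hxq
        simp only [hxq, decide_false, Bool.false_eq_true, if_false]
        omega

-- the binary-search loop on a sorted list computes n - countP (· ≤ q)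
theorem pvBSGo_correct (ws : List Int) (hp : ws.Pairwise (· ≤ ·)) (q : Int) :
    ∀ (fuel : Nat) (l r pos : Int), (r - l + 1).toNat ≤ fuel → 0 ≤ l →
      r ≤ (ws.length : Int) - 1 →
      l ≤ (ws.countP (fun v => decide (v ≤ q)) : Int) →
      ((pos = -1 ∧ r = (ws.length : Int) - 1) ∨
        ((ws.countP (fun v => decide (v ≤ q)) : Int) ≤ pos ∧ r = pos - 1 ∧ pos ≤ (ws.length : Int) - 1)) →
      pvBSGo ws (ws.length : Int) q fuel l r pos =
        (ws.length : Int) - (ws.countP (fun v => decide (v ≤ q)) : Int) := by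
  intro fuel
  induction fuel with
  | zero =>
    intro l r pos hfe hl hr hlk hinv
    have hkle : ws.countP (fun v => decide (v ≤ q)) ≤ ws.length := List.countP_le_length
    rw [pvBSGo]
    rcases hinv with ⟨hpos, hreq⟩ | ⟨hk, hreq, hposle⟩
    · have : (ws.countP (fun v => decide (v ≤ q)) : Int) = (ws.length : Int) := by omega
      simp [hpos, this]
    · have hposk : pos = (ws.countP (fun v => decide (v ≤ q)) : Int) := by omega
      simp [hposk]
  | succ f ihf =>
    intro l r pos hfe hl hr hlk hinv
    rw [pvBSGo]
    by_cases hlr : l ≤ r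
    · rw [if_pos hlr]
      have hmid := PySem.Int.floordiv_two_mid_bounds (lo := l) (hi := r) hlr
      set mid := PySem.Int.floordiv (l + r) 2 with hmiddef
      have h0mid : 0 ≤ mid := by omega
      have hmidlt : mid < (ws.length : Int) := by omega
      have hmidnat : mid.toNat < ws.length := by omega
      have hget : PySem.List.pyGetD ws mid 0 = ws[mid.toNat] :=
        PySem.List.pyGetD_eq_getElem ws 0 h0mid (by exact_mod_cast hmidlt)
      have hchar := sorted_prefix_le q ws hp mid.toNat hmidnat
      by_cases hcmp : PySem.List.pyGetD ws mid 0 ≤ q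
      · rw [if_pos hcmp]
        have hmidk : mid.toNat < ws.countP (fun v => decide (v ≤ q)) := hchar.1 (hget ▸ hcmp)
        exact ihf (mid + 1) r pos (by omega) (by omega) hr (by omega) hinv
      · rw [if_neg hcmp]
        have hkmid : ws.countP (fun v => decide (v ≤ q)) ≤ mid.toNat := by
          by_contra hc
          exact hcmp (hget ▸ hchar.2 (by omega))
        exact ihf l (mid - 1) mid (by omega) hl (by omega) hlk (Or.inr ⟨by omega, rfl, by omega⟩)
    · rw [if_neg hlr]
      have hkle : ws.countP (fun v => decide (v ≤ q)) ≤ ws.length := List.countP_le_length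
      rcases hinv with ⟨hpos, hreq⟩ | ⟨hk, hreq, hposle⟩
      · have : (ws.countP (fun v => decide (v ≤ q)) : Int) = (ws.length : Int) := by omega
        simp [hpos, this]
      · have hposk : pos = (ws.countP (fun v => decide (v ≤ q)) : Int) := by omega
        simp [hposk]

theorem pvBS_correct (ws : List Int) (hp : ws.Pairwise (· ≤ ·)) (q : Int)
    (l r pos : Int) (hl : 0 ≤ l) (hr : r ≤ (ws.length : Int) - 1)
    (hlk : l ≤ (ws.countP (fun v => decide (v ≤ q)) : Int))
    (hinv : (pos = -1 ∧ r = (ws.length : Int) - 1) ∨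
      ((ws.countP (fun v => decide (v ≤ q)) : Int) ≤ pos ∧ r = pos - 1 ∧ pos ≤ (ws.length : Int) - 1)) :
    pvBS ws (ws.length : Int) q l r pos =
      (ws.length : Int) - (ws.countP (fun v => decide (v ≤ q)) : Int) := by
  unfold pvBS
  exact pvBSGo_correct ws hp q _ l r pos (le_refl _) hl hr hlk hinv

-- n - countP (· ≤ q) is countP (q < ·)
theorem count_gt_eq (xs : List Int) (q : Int) :
    (xs.length : Int) - (xs.countP (fun v => decide (v ≤ q)) : Int)
      = (xs.countP (fun v => decide (q < v)) : Int) := by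
  induction xs with
  | nil => simp
  | cons x t ih =>
    simp only [List.countP_cons, List.length_cons]
    by_cases hx : x ≤ q
    · have : ¬ q < x := by omega
      simp only [hx, this, decide_true, decide_false]
      push_cast
      omega
    · have : q < x := by omega
      simp only [hx, this, decide_true, decide_false]
      push_cast
      omega

-- ===== VERDICT (by name: the statement is the Claim_ definition above) =====
theorem numSmallerByFrequency_spec : Claim_equal_numSmallerByFrequency := by
  intro queries words _hdom _hpre
  unfold Spec_numSmallerByFrequency numSmallerByFrequency numSmallerByFrequency_alt
  have hf : words.map pvFA = words.map pvFB := List.map_congr_left (fun s _ => pvFA_eq_pvFB s)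
  rw [PySem.List.foldl_append_singleton_eq_map]
  rw [List.map_map]
  apply List.map_congr_left
  intro s _
  simp only [Function.comp]
  set ws := PySem.List.sorted (words.map pvFA) (fun x => x) false with hws
  have hperm : ws.Perm (words.map pvFA) := PySem.List.sorted_perm _ _ _
  have hlen : ws.length = words.length := by
    simpa using hperm.length_eq
  have hpair : ws.Pairwise (· ≤ ·) := PySem.List.sorted_pairwise (words.map pvFA) (fun x => x)
  have hbs := pvBS_correct ws hpair (pvFA s) 0 ((ws.length : Int) - 1) (-1)
      (by omega) (by omega) (by positivity) (Or.inl ⟨rfl, rfl⟩)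
  rw [hlen] at hbs
  rw [hbs, pvFA_eq_pvFB s]
  have hcg := count_gt_eq ws (pvFB s)
  rw [pvFA_eq_pvFB s] at *
  have hcp : ws.countP (fun v => decide (v ≤ pvFB s)) = (words.map pvFA).countP _ :=
    hperm.countP_eq _
  have hcp2 : ws.countP (fun v => decide (pvFB s < v)) = (words.map pvFA).countP _ :=
    hperm.countP_eq _
  rw [← hlen, hcg, hcp2, hf]
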